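-- pv_equiv track=rewrite | github.com/zzx0403/daily-leetcode | 17.19_20220926.py | missingTwo
-- ===== SOURCE A (Python) =====
-- from typing import List
--
-- def missingTwo(nums: List[int]) -> List[int]:
--     nums.sort()
--     nums.append(-1)
--     nums.append(-1)
--     ans = []
--     for i in range(len(nums)):
--         if nums[i] != i+1:
--             nums.insert(i,i+1)
--             ans.append(i+1)
--     return ans
-- ===== SOURCE B (Python) =====
-- from typing import List
--
-- def missingTwo(nums: List[int]) -> List[int]:
--     # Two-pointer sweep over the sorted list: O(n log n), no quadratic inserts.
--     nums.sort()
--     n = len(nums)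
--     ans = []
--     j = 0
--     for k in range(1, n + 3):
--         if j < n and nums[j] == k:
--             j += 1
--         else:
--             ans.append(k)
--     return ans
-- ===== Notes on version B (the rewrite author's own statement) =====
-- stated objective: faster
-- what changed: Replaces A's repeated list.insert into the sorted list (each insert shifting O(n) elements) with a single two-pointer sweep that merges the sorted list against the range 1..n+2, collecting unmatched values.
import Mathlib
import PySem

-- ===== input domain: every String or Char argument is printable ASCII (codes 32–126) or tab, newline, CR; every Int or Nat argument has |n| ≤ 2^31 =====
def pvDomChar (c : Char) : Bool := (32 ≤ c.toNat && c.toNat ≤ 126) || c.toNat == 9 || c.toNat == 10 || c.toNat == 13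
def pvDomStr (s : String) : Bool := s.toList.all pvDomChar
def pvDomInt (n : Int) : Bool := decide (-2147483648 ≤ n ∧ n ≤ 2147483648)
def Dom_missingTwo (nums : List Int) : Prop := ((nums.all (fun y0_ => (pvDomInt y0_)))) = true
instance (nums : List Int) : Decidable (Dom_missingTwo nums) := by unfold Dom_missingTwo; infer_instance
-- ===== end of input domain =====

-- B replaces A's repeated list.insert into the sorted list with one two-pointer sweep (faster,
-- asymptotic). Both A and B mutate the Python argument in place (A sorts/appends/inserts, B sorts);
-- the equivalence proved here is about the RETURN value only.

-- ===== PORT A =====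
def missingTwo (nums : List Int) : List Int :=
  -- nums.sort(); nums.append(-1); nums.append(-1)
  let nums1 := (PySem.List.sorted nums (fun x => x) false ++ [-1]) ++ [-1]
  -- for i in range(len(nums)): if nums[i] != i+1: nums.insert(i, i+1); ans.append(i+1)
  -- (nums[i] is always in range here, so pyGetD with an unused default is exact)
  let st := (PySem.List.pyRange 0 (nums1.length : Int) 1).foldl
    (fun (st : List Int × List Int) i =>
      if PySem.List.pyGetD st.1 i 0 ≠ i + 1 then
        (PySem.List.insert st.1 i (i + 1), st.2 ++ [i + 1])
      else st)
    (nums1, [])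
  st.2

-- ===== PORT B =====
def missingTwo_alt (nums : List Int) : List Int :=
  let s := PySem.List.sorted nums (fun x => x) false
  let n := s.length
  -- j = 0; for k in range(1, n+3): if j < n and nums[j] == k: j += 1 else: ans.append(k)
  -- (nums[j] is only read under j < n, so pyGetD with an unused default is exact)
  let st := (PySem.List.pyRange 1 ((n : Int) + 3) 1).foldl
    (fun (st : Int × List Int) k =>
      if st.1 < (n : Int) ∧ PySem.List.pyGetD s st.1 0 = k then (st.1 + 1, st.2)
      else (st.1, st.2 ++ [k]))
    ((0 : Int), [])
  st.2

-- ===== PRECONDITION & SPEC =====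
def Spec_missingTwo (nums : List Int) (out : List Int) : Prop := out = missingTwo_alt nums
instance (nums : List Int) (out : List Int) : Decidable (Spec_missingTwo nums out) := by unfold Spec_missingTwo; infer_instance

-- ===== CLAIM (what is proved, stated in full; the proofs are below) =====
def Claim_equal_missingTwo : Prop := ∀ (nums : List Int), Dom_missingTwo nums → Spec_missingTwo nums (missingTwo nums)

-- ===== LEMMAS AND PROOFS =====

-- Common reference: the greedy two-pointer merge of a list against consecutive values
-- k, k+1, …, collecting the m values not matched by the scan.
def twoPtr (r : List Int) (k : Int) : Nat → List Int
  | 0 => []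
  | m + 1 =>
    match r with
    | [] => k :: twoPtr [] (k + 1) m
    | x :: t => if x = k then twoPtr t (k + 1) m else k :: twoPtr (x :: t) (k + 1) m

-- the already-fixed prefix [1, 2, …, i] of A's working list
def fixedPre (i : Nat) : List Int := (List.range i).map (fun t => (t : Int) + 1)

lemma fixedPre_length (i : Nat) : (fixedPre i).length = i := by
  simp [fixedPre]

lemma fixedPre_succ (i : Nat) : fixedPre (i + 1) = fixedPre i ++ [(i : Int) + 1] := by
  simp [fixedPre, List.range_succ]



lemma foldA (m : Nat) : ∀ (i : Nat) (rest ans : List Int),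
    ((PySem.List.pyRange (i : Int) ((i : Int) + (m : Int)) 1).foldl
      (fun (st : List Int × List Int) x =>
        if PySem.List.pyGetD st.1 x 0 ≠ x + 1 then
          (PySem.List.insert st.1 x (x + 1), st.2 ++ [x + 1])
        else st)
      (fixedPre i ++ rest, ans)).2
    = ans ++ twoPtr rest ((i : Int) + 1) m := by
  induction m with
  | zero =>
    intro i rest ans
    rw [show (i : Int) + ((0 : Nat) : Int) = (i : Int) by push_cast; ring,
      PySem.List.pyRange_one_eq_nil (le_refl _)]
    simp [twoPtr]
  | succ m ih =>
    intro i rest ans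
    rw [PySem.List.pyRange_one_cons (by push_cast; omega), List.foldl_cons]
    have hget : PySem.List.pyGetD (fixedPre i ++ rest) (i : Int) 0 = rest.getD 0 0 := by
      rw [PySem.List.pyGetD_natCast]
      rw [List.getD, List.getD, List.getElem?_append_right (by rw [fixedPre_length]),
        fixedPre_length, Nat.sub_self]
    have hrange : (i : Int) + ((m + 1 : Nat) : Int) = ((i : Int) + 1) + (m : Int) := by
      push_cast; ring
    rcases hrest : rest with _ | ⟨x, t⟩
    · have hcond : PySem.List.pyGetD (fixedPre i ++ ([] : List Int)) (i : Int) 0 ≠ (i : Int) + 1 := by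
        rw [hrest] at hget; rw [hget]; simp; omega
      simp only [if_pos hcond]
      have hins : PySem.List.insert (fixedPre i ++ ([] : List Int)) (i : Int) ((i : Int) + 1)
          = fixedPre (i + 1) ++ ([] : List Int) := by
        rw [PySem.List.insert_natCast _ _ _ (by simp [fixedPre_length]), fixedPre_succ]
        simp [List.take_of_length_le (le_of_eq (fixedPre_length i)),
          List.drop_of_length_le (le_of_eq (fixedPre_length i))]
      have ih' := ih (i + 1) [] (ans ++ [(i : Int) + 1])
      push_cast at ih'
      rw [hins, hrange, ih']
      simp [twoPtr]
    · by_cases hx : x = (i : Int) + 1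
      · have hcond : ¬ PySem.List.pyGetD (fixedPre i ++ x :: t) (i : Int) 0 ≠ (i : Int) + 1 := by
          rw [hrest] at hget; rw [hget]; simp [hx]
        simp only [if_neg hcond]
        have hcur : fixedPre i ++ x :: t = fixedPre (i + 1) ++ t := by
          rw [fixedPre_succ, hx]; simp
        have ih' := ih (i + 1) t ans
        push_cast at ih'
        rw [hcur, hrange, ih']
        simp [twoPtr, hx]
      · have hcond : PySem.List.pyGetD (fixedPre i ++ x :: t) (i : Int) 0 ≠ (i : Int) + 1 := by
          rw [hrest] at hget; rw [hget]; simpa using hx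
        simp only [if_pos hcond]
        have hins : PySem.List.insert (fixedPre i ++ x :: t) (i : Int) ((i : Int) + 1)
            = fixedPre (i + 1) ++ x :: t := by
          rw [PySem.List.insert_natCast _ _ _ (by simp [fixedPre_length]), fixedPre_succ]
          rw [List.take_append_of_le_length (le_of_eq (fixedPre_length i).symm),
            List.drop_append_of_le_length (le_of_eq (fixedPre_length i).symm)]
          simp [List.take_of_length_le (le_of_eq (fixedPre_length i)),
            List.drop_of_length_le (le_of_eq (fixedPre_length i))]
        have ih' := ih (i + 1) (x :: t) (ans ++ [(i : Int) + 1])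
        push_cast at ih'
        rw [hins, hrange, ih']
        simp [twoPtr, hx]

lemma foldB (s : List Int) (m : Nat) : ∀ (j : Nat) (k : Int) (ans : List Int), j ≤ s.length →
    ((PySem.List.pyRange k (k + (m : Int)) 1).foldl
      (fun (st : Int × List Int) x =>
        if st.1 < (s.length : Int) ∧ PySem.List.pyGetD s st.1 0 = x then (st.1 + 1, st.2)
        else (st.1, st.2 ++ [x]))
      ((j : Int), ans)).2
    = ans ++ twoPtr (s.drop j) k m := by
  induction m with
  | zero =>
    intro j k ans hj
    rw [show k + ((0 : Nat) : Int) = k by push_cast; ring,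
      PySem.List.pyRange_one_eq_nil (le_refl _)]
    simp [twoPtr]
  | succ m ih =>
    intro j k ans hj
    rw [PySem.List.pyRange_one_cons (by push_cast; omega), List.foldl_cons]
    have hrange : k + ((m + 1 : Nat) : Int) = (k + 1) + (m : Int) := by push_cast; ring
    rcases hd : s.drop j with _ | ⟨x, t⟩
    · have hjlen : s.length ≤ j := by
        have hlen := congrArg List.length hd
        simp at hlen; omega
      have hcond : ¬ ((j : Int) < (s.length : Int) ∧ PySem.List.pyGetD s ((j : Int)) 0 = k) := by
        rintro ⟨h1, -⟩
        have : j < s.length := by exact_mod_cast h1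
        omega
      simp only [if_neg hcond]
      have ih' := ih j (k + 1) (ans ++ [k]) hj
      rw [hd] at ih'
      rw [hrange, ih']
      simp [twoPtr]
    · have hjlt : j < s.length := by
        have hlen := congrArg List.length hd
        simp at hlen; omega
      have hgetx : PySem.List.pyGetD s ((j : Int)) 0 = x := by
        rw [PySem.List.pyGetD_natCast, List.getD]
        have h0 : s[j]? = some x := by
          have h := congrArg (fun l => l[0]?) hd
          simp only [List.getElem?_drop] at h
          simpa using h
        rw [h0]
        rfl
      have hdrop : s.drop (j + 1) = t := by
        have h := congrArg (List.drop 1) hd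
        rw [List.drop_drop] at h
        simpa [Nat.add_comm] using h
      by_cases hx : x = k
      · have hcond : (j : Int) < (s.length : Int) ∧ PySem.List.pyGetD s ((j : Int)) 0 = k := by
          exact ⟨by exact_mod_cast hjlt, by rw [hgetx, hx]⟩
        simp only [if_pos hcond]
        have ih' := ih (j + 1) (k + 1) ans (by omega)
        push_cast at ih'
        rw [hdrop] at ih'
        rw [hrange, ih']
        simp [twoPtr, hx]
      · have hcond : ¬ ((j : Int) < (s.length : Int) ∧ PySem.List.pyGetD s ((j : Int)) 0 = k) := by
          rintro ⟨-, h2⟩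
          rw [hgetx] at h2
          exact hx h2
        simp only [if_neg hcond]
        have ih' := ih j (k + 1) (ans ++ [k]) hj
        rw [hd] at ih'
        rw [hrange, ih']
        simp [twoPtr, hx]

lemma twoPtr_sentinel (m : Nat) : ∀ (t : List Int) (k : Int), 1 ≤ k →
    twoPtr (t ++ [-1, -1]) k m = twoPtr t k m := by
  induction m with
  | zero => intro t k hk; simp [twoPtr]
  | succ m ih =>
    intro t k hk
    cases t with
    | nil =>
      have h1 : ((-1 : Int)) ≠ k := by omega
      have h2 := ih [] (k + 1) (by omega)
      simp only [List.nil_append] at h2 ⊢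
      simp only [twoPtr]
      rw [if_neg h1, h2]
    | cons x t' =>
      simp only [List.cons_append, twoPtr]
      by_cases hx : x = k
      · rw [if_pos hx, if_pos hx, ih t' (k + 1) (by omega)]
      · have h := ih (x :: t') (k + 1) (by omega)
        simp only [List.cons_append] at h
        rw [if_neg hx, if_neg hx, h]

-- ===== VERDICT (by name: the statement is the Claim_ definition above) =====
theorem missingTwo_spec : Claim_equal_missingTwo := by
  unfold Claim_equal_missingTwo
  intro nums _
  unfold Spec_missingTwo missingTwo missingTwo_alt
  simp only []
  set s := PySem.List.sorted nums (fun x => x) false with hs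
  have hA := foldA (s.length + 2) 0 (s ++ [-1, -1]) []
  have hB := foldB s (s.length + 2) 0 1 [] (Nat.zero_le _)
  have hlist : fixedPre 0 ++ (s ++ [-1, -1]) = (s ++ [-1]) ++ [-1] := by simp [fixedPre]
  rw [hlist] at hA
  simp only [Nat.cast_zero, List.nil_append, List.drop_zero] at hA hB
  have hlen : (((s ++ [-1]) ++ [-1]).length : Int) = 0 + ((s.length + 2 : Nat) : Int) := by
    push_cast [List.length_append, List.length_cons, List.length_nil]; ring
  have h3 : ((s.length : Int) + 3) = 1 + ((s.length + 2 : Nat) : Int) := by push_cast; ring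
  rw [hlen, hA, h3, hB]
  rw [show (0 : Int) + 1 = 1 from by ring]
  exact twoPtr_sentinel _ s 1 (le_refl 1)
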